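-- pv_equiv track=rewrite | github.com/posl/comment_recommendation | script/mod_gen/3_time/zh/242_C/2.py | solve
-- ===== SOURCE A (Python) =====
-- def solve(n):
--     #dp[i][j]表示长度为i的数，首位为j的数的个数
--     dp = [[0 for i in range(10)] for j in range(n+1)]
--     for i in range(1,10):
--         dp[1][i] = 1
--     for i in range(2,n+1):
--         for j in range(10):
--             for k in range(10):
--                 if abs(j-k) <= 1:
--                     dp[i][j] += dp[i-1][k]
--                     dp[i][j] %= 998244353
--     ans = 0
--     for i in range(10):
--         ans += dp[n][i]
--         ans %= 998244353
--     return ans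
-- ===== SOURCE B (Python) =====
-- def solve(n):
--     M = 998244353
--     T = [[1 if abs(i - j) <= 1 else 0 for j in range(10)] for i in range(10)]
--     P = [[1 if i == j else 0 for j in range(10)] for i in range(10)]
--
--     def mul(A, B):
--         return [[sum(A[i][k] * B[k][j] for k in range(10)) % M
--                  for j in range(10)] for i in range(10)]
--
--     e = n - 1
--     while e > 0:
--         if e % 2 == 1:
--             P = mul(P, T)
--         T = mul(T, T)
--         e //= 2
--     v = [0] + [1] * 9
--     w = [sum(P[i][j] * v[j] for j in range(10)) % M for i in range(10)]
--     return sum(w) % M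
-- ===== Notes on version B (the rewrite author's own statement) =====
-- stated objective: faster
-- what changed: Replaces the row-by-row O(n) DP table with binary exponentiation of the fixed 10x10 tridiagonal transition matrix mod 998244353, then one matrix-vector product.
import Mathlib
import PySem

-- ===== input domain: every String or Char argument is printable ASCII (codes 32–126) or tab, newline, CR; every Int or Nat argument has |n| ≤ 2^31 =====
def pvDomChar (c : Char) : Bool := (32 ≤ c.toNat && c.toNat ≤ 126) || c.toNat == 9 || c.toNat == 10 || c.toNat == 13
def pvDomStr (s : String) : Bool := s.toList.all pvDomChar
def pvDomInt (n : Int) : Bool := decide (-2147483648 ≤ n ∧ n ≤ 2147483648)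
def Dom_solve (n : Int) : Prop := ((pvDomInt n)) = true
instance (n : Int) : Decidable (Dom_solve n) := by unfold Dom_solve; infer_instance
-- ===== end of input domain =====

-- B replaces A's O(n) row-by-row DP with binary exponentiation of the fixed 10×10
-- transition matrix mod 998244353 (O(log n) matrix multiplications).

-- ===== PORT A =====
def solve (n : Int) : Int :=
  let dp : List (List Int) :=
    (PySem.List.pyRange 0 (n+1) 1).map (fun _ =>
      (PySem.List.pyRange 0 10 1).map (fun _ => (0 : Int)))
  let dp := (PySem.List.pyRange 1 10 1).foldl (fun dp i =>
      PySem.List.pySetD dp 1 (PySem.List.pySetD (PySem.List.pyGetD dp 1 []) i 1)) dp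
  let dp := (PySem.List.pyRange 2 (n+1) 1).foldl (fun dp i =>
      (PySem.List.pyRange 0 10 1).foldl (fun dp j =>
        (PySem.List.pyRange 0 10 1).foldl (fun dp k =>
          if |j - k| ≤ 1 then
            PySem.List.pySetD dp i (PySem.List.pySetD (PySem.List.pyGetD dp i []) j
              (PySem.Int.mod (PySem.List.pyGetD (PySem.List.pyGetD dp i []) j 0 +
                PySem.List.pyGetD (PySem.List.pyGetD dp (i-1) []) k 0) 998244353))
          else dp) dp) dp) dp
  (PySem.List.pyRange 0 10 1).foldl (fun ans i =>
    PySem.Int.mod (ans + PySem.List.pyGetD (PySem.List.pyGetD dp n []) i 0) 998244353) 0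

-- ===== PORT B =====
def pvMatMul (A B : List (List Int)) : List (List Int) :=
  (PySem.List.pyRange 0 10 1).map (fun i =>
    (PySem.List.pyRange 0 10 1).map (fun j =>
      PySem.Int.mod ((PySem.List.pyRange 0 10 1).foldl (fun s k =>
        s + PySem.List.pyGetD (PySem.List.pyGetD A i []) k 0 *
            PySem.List.pyGetD (PySem.List.pyGetD B k []) j 0) 0) 998244353))

-- while e > 0: (if e % 2 == 1: P = mul(P,T)); T = mul(T,T); e //= 2
def pvMatPowLoop (P T : List (List Int)) (e : Nat) : List (List Int) :=
  if e = 0 then P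
  else pvMatPowLoop (if e % 2 = 1 then pvMatMul P T else P) (pvMatMul T T) (e / 2)
  termination_by e
  decreasing_by omega

def solve_alt (n : Int) : Int :=
  let T : List (List Int) := (PySem.List.pyRange 0 10 1).map (fun i =>
    (PySem.List.pyRange 0 10 1).map (fun j => if |i - j| ≤ 1 then (1 : Int) else 0))
  let P : List (List Int) := (PySem.List.pyRange 0 10 1).map (fun i =>
    (PySem.List.pyRange 0 10 1).map (fun j => if i = j then (1 : Int) else 0))
  let P := pvMatPowLoop P T (n - 1).toNat
  let v : List Int := [0] ++ List.replicate 9 1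
  let w : List Int := (PySem.List.pyRange 0 10 1).map (fun i =>
    PySem.Int.mod ((PySem.List.pyRange 0 10 1).foldl (fun s j =>
      s + PySem.List.pyGetD (PySem.List.pyGetD P i []) j 0 *
          PySem.List.pyGetD v j 0) 0) 998244353)
  PySem.Int.mod w.sum 998244353

-- ===== PRECONDITION & SPEC =====
-- A indexes dp[1], which exists only for n ≥ 1; on n ≤ 0 A raises IndexError.
def Pre_solve (n : Int) : Prop := 1 ≤ n
instance (n : Int) : Decidable (Pre_solve n) := by unfold Pre_solve; infer_instance
def pvWitness_solve : Int := 3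

def Spec_solve (n : Int) (out : Int) : Prop := out = solve_alt n
instance (n : Int) (out : Int) : Decidable (Spec_solve n out) := by unfold Spec_solve; infer_instance

-- ===== CLAIM (what is proved, stated in full; the proofs are below) =====
def Claim_equal_solve : Prop := ∀ (n : Int), Dom_solve n → Pre_solve n → Spec_solve n (solve n)

-- ===== LEMMAS AND PROOFS =====

theorem pvGetD_nonneg {α : Type} (xs : List α) (i : Int) (d : α) (h : 0 ≤ i) :
    PySem.List.pyGetD xs i d = xs.getD i.toNat d := by
  conv_lhs => rw [← Int.toNat_of_nonneg h]
  rw [PySem.List.pyGetD_natCast]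

theorem pvSetD_nonneg {α : Type} (xs : List α) (i : Int) (v : α) (h : 0 ≤ i) :
    PySem.List.pySetD xs i v = xs.set i.toNat v := by
  conv_lhs => rw [← Int.toNat_of_nonneg h]
  rw [PySem.List.pySetD_natCast]

theorem pvGetD_set_eq {α : Type} (xs : List α) (n : Nat) (v d : α) (h : n < xs.length) :
    (xs.set n v).getD n d = v := by
  simp [List.getD_eq_getElem?_getD, h]

theorem pvGetD_set_ne {α : Type} (xs : List α) (n m : Nat) (v d : α) (h : n ≠ m) :
    (xs.set n v).getD m d = xs.getD m d := by
  simp [List.getD_eq_getElem?_getD, List.getElem?_set_ne h]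

theorem pvSetOwn {α : Type} (l : List α) (n : Nat) (d : α) (h : n < l.length) :
    l.set n (l.getD n d) = l := by
  rw [List.getD_eq_getElem?_getD, List.getElem?_eq_getElem h, Option.getD_some,
    List.set_getElem_self]

-- a fold whose body only rewrites row i of the table factors through that row

theorem pvLift {α : Type} (i : Int) (hi : 0 ≤ i) (g : List Int → α → List Int)
    (xs : List α) : ∀ dp : List (List Int), i.toNat < dp.length →
    xs.foldl (fun dp x => PySem.List.pySetD dp i (g (PySem.List.pyGetD dp i []) x)) dp
      = PySem.List.pySetD dp i (xs.foldl g (PySem.List.pyGetD dp i [])) := by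
  induction xs with
  | nil =>
    intro dp hlen
    simp only [List.foldl_nil]
    rw [pvSetD_nonneg _ _ _ hi, pvGetD_nonneg _ _ _ hi, List.getD_eq_getElem?_getD,
      List.getElem?_eq_getElem hlen]
    simp [List.set_getElem_self]
  | cons x xs ih =>
    intro dp hlen
    simp only [List.foldl_cons]
    rw [ih (PySem.List.pySetD dp i (g (PySem.List.pyGetD dp i []) x))
      (by rw [pvSetD_nonneg _ _ _ hi]; simpa using hlen)]
    rw [pvSetD_nonneg _ _ _ hi, pvSetD_nonneg _ _ _ hi, pvSetD_nonneg _ _ _ hi,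
      pvGetD_nonneg _ _ _ hi, pvGetD_nonneg _ _ _ hi]
    rw [pvGetD_set_eq _ _ _ _ hlen, List.set_set]

-- inner k-loop: accumulates into cell (i, j), reading row i-1

theorem pvKFold (i j : Int) (hi : 1 ≤ i) (hj : 0 ≤ j) (ks : List Int) :
    ∀ dp : List (List Int), i.toNat < dp.length →
      j.toNat < (PySem.List.pyGetD dp i []).length →
    ks.foldl (fun dp k =>
      if |j - k| ≤ 1 then
        PySem.List.pySetD dp i (PySem.List.pySetD (PySem.List.pyGetD dp i []) j
          (PySem.Int.mod (PySem.List.pyGetD (PySem.List.pyGetD dp i []) j 0 +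
            PySem.List.pyGetD (PySem.List.pyGetD dp (i-1) []) k 0) 998244353))
      else dp) dp
    = PySem.List.pySetD dp i (PySem.List.pySetD (PySem.List.pyGetD dp i []) j
        (ks.foldl (fun c k =>
          if |j - k| ≤ 1 then
            PySem.Int.mod (c + PySem.List.pyGetD (PySem.List.pyGetD dp (i-1) []) k 0) 998244353
          else c) (PySem.List.pyGetD (PySem.List.pyGetD dp i []) j 0))) := by
  have hi0 : (0:Int) ≤ i := by omega
  have hi1 : (0:Int) ≤ i - 1 := by omega
  have hne : (i-1).toNat ≠ i.toNat := by omega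
  induction ks with
  | nil =>
    intro dp hlen hrow
    rw [pvGetD_nonneg _ _ _ hi0] at hrow
    simp only [List.foldl_nil]
    have h1 : PySem.List.pySetD (PySem.List.pyGetD dp i [])
        j (PySem.List.pyGetD (PySem.List.pyGetD dp i []) j 0)
        = PySem.List.pyGetD dp i [] := by
      rw [pvSetD_nonneg _ _ _ hj, pvGetD_nonneg _ _ _ hj]
      exact pvSetOwn _ _ _ (by rw [pvGetD_nonneg _ _ _ hi0]; exact hrow)
    rw [h1, pvSetD_nonneg _ _ _ hi0, pvGetD_nonneg _ _ _ hi0]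
    exact (pvSetOwn _ _ _ hlen).symm
  | cons k ks ih =>
    intro dp hlen hrow
    rw [pvGetD_nonneg _ _ _ hi0] at hrow
    simp only [List.foldl_cons]
    by_cases hc : |j - k| ≤ 1
    · simp only [if_pos hc]
      set row := PySem.List.pyGetD dp i [] with hrowdef
      set v := PySem.Int.mod (PySem.List.pyGetD row j 0 +
        PySem.List.pyGetD (PySem.List.pyGetD dp (i-1) []) k 0) 998244353 with hv
      set dp' := PySem.List.pySetD dp i (PySem.List.pySetD row j v) with hdp'
      have hlen' : i.toNat < dp'.length := by
        rw [hdp', pvSetD_nonneg _ _ _ hi0]; simpa using hlen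
      have hget' : PySem.List.pyGetD dp' i [] = PySem.List.pySetD row j v := by
        rw [hdp', pvSetD_nonneg _ _ _ hi0, pvGetD_nonneg _ _ _ hi0, pvGetD_set_eq _ _ _ _ hlen]
      have hprev' : PySem.List.pyGetD dp' (i-1) [] = PySem.List.pyGetD dp (i-1) [] := by
        rw [hdp', pvSetD_nonneg _ _ _ hi0, pvGetD_nonneg _ _ _ hi1, pvGetD_nonneg _ _ _ hi1,
          pvGetD_set_ne _ _ _ _ _ (by omega)]
      have hrow' : j.toNat < (PySem.List.pyGetD dp' i []).length := by
        rw [hget', pvSetD_nonneg _ _ _ hj]; simpa [hrowdef, pvGetD_nonneg _ _ _ hi0] using hrow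
      rw [ih dp' hlen' (by rw [pvGetD_nonneg _ _ _ hi0] at hrow' ⊢; exact hrow')]
      rw [hget', hprev']
      have hrownat : j.toNat < row.length := by
        rw [hrowdef, pvGetD_nonneg _ _ _ hi0]; exact hrow
      have hcell : PySem.List.pyGetD (PySem.List.pySetD row j v) j 0 = v := by
        rw [pvSetD_nonneg _ _ _ hj, pvGetD_nonneg _ _ _ hj]
        exact pvGetD_set_eq _ _ _ _ hrownat
      have hsetset : ∀ w, PySem.List.pySetD (PySem.List.pySetD row j v) j w
          = PySem.List.pySetD row j w := by
        intro w
        rw [pvSetD_nonneg _ _ _ hj, pvSetD_nonneg _ _ _ hj, pvSetD_nonneg _ _ _ hj, List.set_set]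
      have hdpset : ∀ r, PySem.List.pySetD dp' i r = PySem.List.pySetD dp i r := by
        intro r
        rw [hdp', pvSetD_nonneg _ _ _ hi0, pvSetD_nonneg _ _ _ hi0, pvSetD_nonneg _ _ _ hi0,
          List.set_set]
      rw [hcell, hsetset, hdpset]
    · simp only [if_neg hc]
      exact ih dp hlen (by rw [pvGetD_nonneg _ _ _ hi0]; exact hrow)

def pvKVal (prev : List Int) (j : Int) (c0 : Int) : Int :=
  (PySem.List.pyRange 0 10 1).foldl (fun c k =>
    if |j - k| ≤ 1 then PySem.Int.mod (c + PySem.List.pyGetD prev k 0) 998244353 else c) c0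

theorem pvJFold (i : Int) (hi : 1 ≤ i) (js : List Int) :
    ∀ dp : List (List Int), i.toNat < dp.length → (∀ j ∈ js, 0 ≤ j ∧ j.toNat < 10) →
      (PySem.List.pyGetD dp i []).length = 10 →
    js.foldl (fun dp j =>
      (PySem.List.pyRange 0 10 1).foldl (fun dp k =>
        if |j - k| ≤ 1 then
          PySem.List.pySetD dp i (PySem.List.pySetD (PySem.List.pyGetD dp i []) j
            (PySem.Int.mod (PySem.List.pyGetD (PySem.List.pyGetD dp i []) j 0 +
              PySem.List.pyGetD (PySem.List.pyGetD dp (i-1) []) k 0) 998244353))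
        else dp) dp) dp
    = PySem.List.pySetD dp i (js.foldl (fun row j =>
        PySem.List.pySetD row j
          (pvKVal (PySem.List.pyGetD dp (i-1) []) j (PySem.List.pyGetD row j 0)))
        (PySem.List.pyGetD dp i [])) := by
  have hi0 : (0:Int) ≤ i := by omega
  have hi1 : (0:Int) ≤ i - 1 := by omega
  induction js with
  | nil =>
    intro dp hlen _ _
    simp only [List.foldl_nil]
    rw [pvSetD_nonneg _ _ _ hi0, pvGetD_nonneg _ _ _ hi0]
    exact (pvSetOwn _ _ _ hlen).symm
  | cons j js ih =>
    intro dp hlen hjs hrowlen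
    obtain ⟨hj0, hj10⟩ := hjs j (by simp)
    simp only [List.foldl_cons]
    rw [pvKFold i j hi hj0 _ dp hlen (by rw [hrowlen]; exact hj10)]
    set row := PySem.List.pyGetD dp i [] with hrowdef
    set prev := PySem.List.pyGetD dp (i-1) [] with hprevdef
    set v := pvKVal prev j (PySem.List.pyGetD row j 0) with hv
    have hvraw : (PySem.List.pyRange 0 10 1).foldl (fun c k =>
        if |j - k| ≤ 1 then PySem.Int.mod (c + PySem.List.pyGetD prev k 0) 998244353 else c)
        (PySem.List.pyGetD row j 0) = v := rfl
    rw [hvraw]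
    set dp' := PySem.List.pySetD dp i (PySem.List.pySetD row j v) with hdp'
    have hlen' : i.toNat < dp'.length := by
      rw [hdp', pvSetD_nonneg _ _ _ hi0]; simpa using hlen
    have hget' : PySem.List.pyGetD dp' i [] = PySem.List.pySetD row j v := by
      rw [hdp', pvSetD_nonneg _ _ _ hi0, pvGetD_nonneg _ _ _ hi0]
      exact pvGetD_set_eq _ _ _ _ hlen
    have hprev' : PySem.List.pyGetD dp' (i-1) [] = prev := by
      rw [hdp', pvSetD_nonneg _ _ _ hi0, pvGetD_nonneg _ _ _ hi1, hprevdef,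
        pvGetD_nonneg _ _ _ hi1]
      exact pvGetD_set_ne _ _ _ _ _ (by omega)
    have hrowlen' : (PySem.List.pyGetD dp' i []).length = 10 := by
      rw [hget', pvSetD_nonneg _ _ _ hj0]
      simpa using hrowlen
    rw [ih dp' hlen' (fun x hx => hjs x (by simp [hx])) hrowlen']
    rw [hget', hprev']
    have hdpset : ∀ r, PySem.List.pySetD dp' i r = PySem.List.pySetD dp i r := by
      intro r
      rw [hdp', pvSetD_nonneg _ _ _ hi0, pvSetD_nonneg _ _ _ hi0, pvSetD_nonneg _ _ _ hi0,
        List.set_set]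
    rw [hdpset]

theorem pvRowFill (prev : List Int) : ∀ (b a : Nat), a + b = 10 → ∀ row : List Int,
    row.length = 10 →
    (PySem.List.pyRange (a:Int) 10 1).foldl (fun row j =>
      PySem.List.pySetD row j (pvKVal prev j (PySem.List.pyGetD row j 0))) row
    = List.ofFn (fun t : Fin 10 =>
        if (t:Nat) < a then row.getD t 0 else pvKVal prev ((t:Nat):Int) (row.getD t 0)) := by
  intro b
  induction b with
  | zero =>
    intro a ha row hlen
    have ha10 : a = 10 := by omega
    subst ha10
    rw [PySem.List.pyRange_one_eq_nil (by norm_num)]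
    simp only [List.foldl_nil]
    refine List.ext_getElem (by simp [hlen]) ?_
    intro t h1 h2
    simp only [List.getElem_ofFn]
    rw [if_pos (by omega), List.getD_eq_getElem?_getD, List.getElem?_eq_getElem (by omega),
      Option.getD_some]
  | succ b ih =>
    intro a ha row hlen
    have ha10 : a < 10 := by omega
    rw [PySem.List.pyRange_one_cons (by exact_mod_cast ha10)]
    simp only [List.foldl_cons]
    rw [show ((a:Int)+1) = ((a+1:Nat):Int) by push_cast; ring]
    rw [PySem.List.pySetD_natCast, PySem.List.pyGetD_natCast]
    set row' := row.set a (pvKVal prev (a:Int) (row.getD a 0)) with hrow'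
    have hlen' : row'.length = 10 := by simp [hrow', hlen]
    rw [ih (a+1) (by omega) row' hlen']
    refine List.ext_getElem (by simp) ?_
    intro t h1 h2
    simp only [List.getElem_ofFn]
    rcases Nat.lt_trichotomy t a with hc | hc | hc
    · rw [if_pos (by omega), if_pos (by omega), hrow',
        pvGetD_set_ne _ _ _ _ _ (by omega)]
    · subst hc
      rw [if_pos (by omega), if_neg (by omega), hrow',
        pvGetD_set_eq _ _ _ _ (by omega)]
    · rw [if_neg (by omega), if_neg (by omega), hrow',
        pvGetD_set_ne _ _ _ _ _ (by omega)]

def pvZeroRow : List Int := (PySem.List.pyRange 0 10 1).map (fun _ => (0 : Int))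

def pvRow1 : List Int := [0,1,1,1,1,1,1,1,1,1]

def pvRowA (prev : List Int) : List Int :=
  (PySem.List.pyRange 0 10 1).map (fun j => pvKVal prev j 0)

def pvRowIter : Nat → List Int
  | 0 => pvRow1
  | k+1 => pvRowA (pvRowIter k)

def pvDpAt (n : Int) (m : Nat) : List (List Int) :=
  (PySem.List.pyRange 0 (n+1) 1).map (fun r =>
    if 1 ≤ r ∧ r ≤ (m : Int) then pvRowIter (r.toNat - 1) else pvZeroRow)

theorem pvZeroRow_len : pvZeroRow.length = 10 := by decide

theorem pvZeroRow_getD (t : Nat) : pvZeroRow.getD t 0 = 0 := by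
  rw [show pvZeroRow = List.replicate 10 0 from by decide]
  rw [List.getD_eq_getElem?_getD, List.getElem?_replicate]
  split <;> rfl

theorem pvRowA_ofFn (prev : List Int) :
    pvRowA prev = List.ofFn (fun t : Fin 10 => pvKVal prev ((t:Nat):Int) 0) := by
  have h10 : PySem.List.pyRange 0 10 1 = [0,1,2,3,4,5,6,7,8,9] := by decide
  simp [pvRowA, h10, List.ofFn_succ]

theorem pvRowA_len (prev : List Int) : (pvRowA prev).length = 10 := by
  rw [pvRowA_ofFn]; simp

theorem pvRowIter_len (k : Nat) : (pvRowIter k).length = 10 := by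
  cases k with
  | zero => decide
  | succ k => exact pvRowA_len _

-- the j-k double loop at row i turns the (still zero) row i into pvRowA (row i-1)

theorem pvRowStep (i : Int) (hi : 1 ≤ i) (dp : List (List Int))
    (hlen : i.toNat < dp.length) (hzero : PySem.List.pyGetD dp i [] = pvZeroRow) :
    (PySem.List.pyRange 0 10 1).foldl (fun dp j =>
      (PySem.List.pyRange 0 10 1).foldl (fun dp k =>
        if |j - k| ≤ 1 then
          PySem.List.pySetD dp i (PySem.List.pySetD (PySem.List.pyGetD dp i []) j
            (PySem.Int.mod (PySem.List.pyGetD (PySem.List.pyGetD dp i []) j 0 +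
              PySem.List.pyGetD (PySem.List.pyGetD dp (i-1) []) k 0) 998244353))
        else dp) dp) dp
    = PySem.List.pySetD dp i (pvRowA (PySem.List.pyGetD dp (i-1) [])) := by
  rw [pvJFold i hi _ dp hlen
    (fun j hj => by
      rw [PySem.List.mem_pyRange_one] at hj
      exact ⟨hj.1, by omega⟩)
    (by rw [hzero]; exact pvZeroRow_len)]
  refine congrArg (PySem.List.pySetD dp i) ?_
  rw [hzero]
  have hfill := pvRowFill (PySem.List.pyGetD dp (i-1) []) 10 0 (by omega) pvZeroRow pvZeroRow_len
  rw [Nat.cast_zero] at hfill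
  rw [hfill, pvRowA_ofFn]
  refine List.ext_getElem (by simp) ?_
  intro t h1 h2
  simp only [List.getElem_ofFn]
  rw [if_neg (by omega), pvZeroRow_getD]

theorem pvDpAt_len (n : Int) (m : Nat) : (pvDpAt n m).length = (n+1).toNat := by
  simp [pvDpAt, PySem.List.length_pyRange_one]

theorem pvDpAt_getD (n : Int) (m : Nat) (r : Nat) (h : r < (n+1).toNat) :
    (pvDpAt n m).getD r [] = if 1 ≤ r ∧ r ≤ m then pvRowIter (r - 1) else pvZeroRow := by
  have hlen : r < (pvDpAt n m).length := by rw [pvDpAt_len]; exact h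
  rw [List.getD_eq_getElem?_getD, List.getElem?_eq_getElem hlen, Option.getD_some]
  simp only [pvDpAt, List.getElem_map, PySem.List.getElem_pyRange_one, zero_add]
  by_cases hc : 1 ≤ r ∧ r ≤ m
  · rw [if_pos ⟨by exact_mod_cast hc.1, by exact_mod_cast hc.2⟩, if_pos hc, Int.toNat_natCast]
  · rw [if_neg (fun hx => hc ⟨by exact_mod_cast hx.1, by exact_mod_cast hx.2⟩), if_neg hc]

theorem pvDpAt_set (n : Int) (m : Nat) (h : m + 1 < (n+1).toNat) :
    (pvDpAt n m).set (m+1) (pvRowIter m) = pvDpAt n (m+1) := by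
  refine List.ext_getElem (by simp [pvDpAt_len]) ?_
  intro r h1 h2
  have hr : r < (n+1).toNat := by rw [← pvDpAt_len n (m+1)]; exact h2
  have e1 : (pvDpAt n m)[r]'(by rw [pvDpAt_len]; exact hr) = (pvDpAt n m).getD r [] := by
    rw [List.getD_eq_getElem?_getD, List.getElem?_eq_getElem (by rw [pvDpAt_len]; exact hr),
      Option.getD_some]
  have e2 : (pvDpAt n (m+1))[r]'h2 = (pvDpAt n (m+1)).getD r [] := by
    rw [List.getD_eq_getElem?_getD, List.getElem?_eq_getElem h2, Option.getD_some]
  rw [List.getElem_set, e2, pvDpAt_getD n (m+1) r hr]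
  by_cases hc : m + 1 = r
  · rw [if_pos hc, if_pos (by omega)]
    subst hc
    simp
  · rw [if_neg hc, e1, pvDpAt_getD n m r hr]
    by_cases hc2 : 1 ≤ r ∧ r ≤ m
    · rw [if_pos hc2, if_pos (by omega)]
    · rw [if_neg hc2, if_neg (by omega)]

theorem pvInit (n : Int) (hn : 1 ≤ n) :
    (PySem.List.pyRange 1 10 1).foldl (fun dp i =>
      PySem.List.pySetD dp 1 (PySem.List.pySetD (PySem.List.pyGetD dp 1 []) i 1))
      ((PySem.List.pyRange 0 (n+1) 1).map (fun _ =>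
        (PySem.List.pyRange 0 10 1).map (fun _ => (0:Int))))
    = pvDpAt n 1 := by
  set dp0 : List (List Int) := (PySem.List.pyRange 0 (n+1) 1).map (fun _ =>
    (PySem.List.pyRange 0 10 1).map (fun _ => (0:Int))) with hdp0
  have hlen0 : dp0.length = (n+1).toNat := by
    simp [hdp0, PySem.List.length_pyRange_one]
  have h := pvLift 1 (by norm_num) (fun row i => PySem.List.pySetD row i 1)
    (PySem.List.pyRange 1 10 1) dp0 (by rw [hlen0]; omega)
  beta_reduce at h
  rw [h]
  have hget : PySem.List.pyGetD dp0 1 [] = pvZeroRow := by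
    rw [pvGetD_nonneg _ _ _ (by norm_num), List.getD_eq_getElem?_getD,
      List.getElem?_eq_getElem (by rw [hlen0]; omega), Option.getD_some]
    simp only [hdp0, List.getElem_map]
    rfl
  rw [hget]
  rw [show (PySem.List.pyRange 1 10 1).foldl
      (fun row i => PySem.List.pySetD row i 1) pvZeroRow = pvRow1 from by decide]
  rw [pvSetD_nonneg _ _ _ (by norm_num)]
  rw [show (1:Int).toNat = 1 from rfl]
  refine List.ext_getElem (by simp [hlen0, pvDpAt_len]) ?_
  intro r h1 h2
  have hr : r < (n+1).toNat := by rw [← pvDpAt_len n 1]; exact h2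
  have e0 : ∀ (hh : r < dp0.length), dp0[r]'hh = pvZeroRow := by
    intro hh
    simp only [hdp0, List.getElem_map]
    rfl
  have e2 : (pvDpAt n 1)[r]'h2 = (pvDpAt n 1).getD r [] := by
    rw [List.getD_eq_getElem?_getD, List.getElem?_eq_getElem h2, Option.getD_some]
  rw [List.getElem_set, e2, pvDpAt_getD n 1 r hr]
  by_cases hc : 1 = r
  · rw [if_pos hc, if_pos (by omega)]
    subst hc
    rfl
  · rw [if_neg hc, if_neg (by omega), e0]

theorem pvOuter (n : Int) (hn : 1 ≤ n) : ∀ (m : Nat) (hm : 1 ≤ m), (m:Int) ≤ n →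
    (PySem.List.pyRange 2 ((m:Int)+1) 1).foldl (fun dp i =>
      (PySem.List.pyRange 0 10 1).foldl (fun dp j =>
        (PySem.List.pyRange 0 10 1).foldl (fun dp k =>
          if |j - k| ≤ 1 then
            PySem.List.pySetD dp i (PySem.List.pySetD (PySem.List.pyGetD dp i []) j
              (PySem.Int.mod (PySem.List.pyGetD (PySem.List.pyGetD dp i []) j 0 +
                PySem.List.pyGetD (PySem.List.pyGetD dp (i-1) []) k 0) 998244353))
          else dp) dp) dp) (pvDpAt n 1) = pvDpAt n m := by
  intro m hm
  induction m, hm using Nat.le_induction with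
  | base =>
    intro _
    rw [PySem.List.pyRange_one_eq_nil (by push_cast : ((1:Nat):Int)+1 ≤ 2)]
    rfl
  | succ m hm ih =>
    intro hle
    have hle' : (m:Int) ≤ n := by push_cast at hle ⊢; omega
    rw [show ((m+1:Nat):Int)+1 = ((m:Int)+1)+1 from by push_cast; ring]
    rw [PySem.List.pyRange_one_succ_right (by push_cast; omega)]
    rw [List.foldl_append, ih hle']
    simp only [List.foldl_cons, List.foldl_nil]
    have hzero : PySem.List.pyGetD (pvDpAt n m) ((m:Int)+1) [] = pvZeroRow := by
      rw [pvGetD_nonneg _ _ _ (by omega), show ((m:Int)+1).toNat = m+1 from by omega,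
        pvDpAt_getD n m (m+1) (by omega), if_neg (by omega)]
    rw [pvRowStep ((m:Int)+1) (by omega) (pvDpAt n m)
      (by rw [pvDpAt_len]; omega) hzero]
    have hprev : PySem.List.pyGetD (pvDpAt n m) (((m:Int)+1)-1) [] = pvRowIter (m-1) := by
      rw [show (((m:Int)+1)-1) = ((m:Nat):Int) from by ring, PySem.List.pyGetD_natCast,
        pvDpAt_getD n m m (by omega), if_pos ⟨hm, le_refl m⟩]
    rw [hprev]
    have hra : pvRowA (pvRowIter (m-1)) = pvRowIter m := by
      conv_rhs => rw [show m = (m-1)+1 from by omega]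
      rfl
    rw [hra, pvSetD_nonneg _ _ _ (by omega), show ((m:Int)+1).toNat = m+1 from by omega,
      pvDpAt_set n m (by omega)]

theorem pvSolveRow (n : Int) (hn : 1 ≤ n) :
    solve n = (PySem.List.pyRange 0 10 1).foldl (fun ans i =>
      PySem.Int.mod (ans + PySem.List.pyGetD (pvRowIter (n.toNat - 1)) i 0) 998244353) 0 := by
  simp only [solve]
  rw [pvInit n hn]
  rw [show (n+1) = ((n.toNat:Int)+1) from by omega]
  rw [pvOuter n hn n.toNat (by omega) (by omega)]
  have hget : PySem.List.pyGetD (pvDpAt n n.toNat) n [] = pvRowIter (n.toNat - 1) := by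
    rw [pvGetD_nonneg _ _ _ (by omega), pvDpAt_getD n n.toNat n.toNat (by omega),
      if_pos ⟨by omega, le_refl _⟩]
  rw [hget]

theorem pvFoldMod : ∀ (l : List Int), l ≠ [] → ∀ c : Int,
    l.foldl (fun a x => PySem.Int.mod (a + x) 998244353) c
      = PySem.Int.mod (c + l.sum) 998244353 := by
  intro l
  induction l with
  | nil => intro h; exact absurd rfl h
  | cons x l ih =>
    intro _ c
    simp only [List.foldl_cons, List.sum_cons]
    cases l with
    | nil => simp
    | cons y l =>
      rw [ih (by simp) _]
      simp only [PySem.Int.mod_eq_emod_of_pos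
        (show (0:Int) < (998244353:Int) from by norm_num)]
      rw [Int.emod_add_emod]
      ring_nf

theorem pvCastMod (a : Int) :
    ((PySem.Int.mod a 998244353 : Int) : ZMod 998244353) = (a : ZMod 998244353) := by
  rw [PySem.Int.mod_eq_emod_of_pos (by norm_num)]
  exact_mod_cast ZMod.intCast_mod a 998244353

theorem pvModEqOfCast (a b : Int)
    (h : (a : ZMod 998244353) = (b : ZMod 998244353)) :
    PySem.Int.mod a 998244353 = PySem.Int.mod b 998244353 := by
  rw [PySem.Int.mod_eq_emod_of_pos (by norm_num), PySem.Int.mod_eq_emod_of_pos (by norm_num)]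
  have := (ZMod.intCast_eq_intCast_iff a b 998244353).1 h
  simpa [Int.ModEq] using this

def pvTz : Matrix (Fin 10) (Fin 10) (ZMod 998244353) :=
  Matrix.of fun i j => if |((i : Nat) : Int) - ((j : Nat) : Int)| ≤ 1 then 1 else 0

def pvToV (r : List Int) : Fin 10 → ZMod 998244353 :=
  fun j => ((PySem.List.pyGetD r (((j : Nat) : Int)) 0 : Int) : ZMod 998244353)

def pvToM (A : List (List Int)) : Matrix (Fin 10) (Fin 10) (ZMod 998244353) :=
  Matrix.of fun i j =>
    ((PySem.List.pyGetD (PySem.List.pyGetD A (((i : Nat) : Int)) [])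
      (((j : Nat) : Int)) 0 : Int) : ZMod 998244353)

theorem pvToM_mul (A B : List (List Int)) :
    pvToM (pvMatMul A B) = pvToM A * pvToM B := by
  ext i j
  rw [Matrix.mul_apply]
  simp only [pvToM, Matrix.of_apply, pvMatMul]
  rw [PySem.List.pyGetD_map_pyRange_of_nonneg _ 10 _ _ (by positivity) (by exact_mod_cast i.isLt)]
  rw [PySem.List.pyGetD_map_pyRange_of_nonneg _ 10 _ _ (by positivity) (by exact_mod_cast j.isLt)]
  rw [pvCastMod]
  rw [PySem.List.foldl_add]
  rw [show PySem.List.pyRange 0 10 1 = [0,1,2,3,4,5,6,7,8,9] from by decide]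
  simp only [List.map_cons, List.map_nil, List.sum_cons, List.sum_nil, Fin.sum_univ_succ,
    Fin.sum_univ_zero]
  push_cast
  norm_num [Fin.val_zero, Fin.val_succ]

theorem pvPowLoop : ∀ (e : Nat) (P T : List (List Int)),
    pvToM (pvMatPowLoop P T e) = pvToM P * (pvToM T)^e := by
  intro e
  induction e using Nat.strong_induction_on with
  | _ e ih =>
    intro P T
    rw [pvMatPowLoop]
    by_cases h0 : e = 0
    · subst h0; simp
    · rw [if_neg h0, ih (e/2) (by omega), pvToM_mul]
      have h2 : pvToM T * pvToM T = pvToM T ^ 2 := (sq (pvToM T)).symm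
      by_cases h1 : e % 2 = 1
      · rw [if_pos h1, pvToM_mul, h2, ← pow_mul, mul_assoc, ← pow_succ',
          show 2*(e/2)+1 = e from by omega]
      · rw [if_neg h1, h2, ← pow_mul, show 2*(e/2) = e from by omega]

theorem pvToM_T : pvToM ((PySem.List.pyRange 0 10 1).map (fun i =>
    (PySem.List.pyRange 0 10 1).map (fun j => if |i - j| ≤ 1 then (1:Int) else 0))) = pvTz := by
  ext i j
  simp only [pvToM, pvTz, Matrix.of_apply]
  rw [PySem.List.pyGetD_map_pyRange_of_nonneg _ 10 _ _ (by positivity) (by exact_mod_cast i.isLt)]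
  rw [PySem.List.pyGetD_map_pyRange_of_nonneg _ 10 _ _ (by positivity) (by exact_mod_cast j.isLt)]
  split_ifs <;> simp

theorem pvToM_I : pvToM ((PySem.List.pyRange 0 10 1).map (fun i =>
    (PySem.List.pyRange 0 10 1).map (fun j => if i = j then (1:Int) else 0))) = 1 := by
  ext i j
  simp only [pvToM, Matrix.of_apply]
  rw [PySem.List.pyGetD_map_pyRange_of_nonneg _ 10 _ _ (by positivity) (by exact_mod_cast i.isLt)]
  rw [PySem.List.pyGetD_map_pyRange_of_nonneg _ 10 _ _ (by positivity) (by exact_mod_cast j.isLt)]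
  rw [Matrix.one_apply]
  by_cases h : i = j
  · subst h; simp
  · have hne : ¬ ((i:Nat):Int) = ((j:Nat):Int) := by
      intro hh
      exact h (Fin.ext (by exact_mod_cast hh))
    rw [if_neg hne, if_neg h]
    simp

theorem pvKValCastAux (prev : List Int) (j : Int) : ∀ (l : List Int) (c : Int),
    ((l.foldl (fun c k => if |j - k| ≤ 1 then
        PySem.Int.mod (c + PySem.List.pyGetD prev k 0) 998244353 else c) c : Int)
      : ZMod 998244353)
    = (c : ZMod 998244353) + (l.map (fun k => if |j - k| ≤ 1 then
        ((PySem.List.pyGetD prev k 0 : Int) : ZMod 998244353) else 0)).sum := by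
  intro l
  induction l with
  | nil => simp
  | cons k l ih =>
    intro c
    simp only [List.foldl_cons, List.map_cons, List.sum_cons]
    by_cases hc : |j - k| ≤ 1
    · rw [if_pos hc, if_pos hc, ih, pvCastMod]
      push_cast
      ring
    · rw [if_neg hc, if_neg hc, ih]
      ring

theorem pvToV_rowA (prev : List Int) :
    pvToV (pvRowA prev) = pvTz.mulVec (pvToV prev) := by
  funext jf
  simp only [pvToV, pvRowA]
  rw [PySem.List.pyGetD_map_pyRange_of_nonneg _ 10 _ _ (by positivity) (by exact_mod_cast jf.isLt)]
  simp only [pvKVal]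
  rw [pvKValCastAux]
  rw [show PySem.List.pyRange 0 10 1 = [0,1,2,3,4,5,6,7,8,9] from by decide]
  simp only [Matrix.mulVec, dotProduct, Fin.sum_univ_succ, Fin.sum_univ_zero,
    pvTz, pvToV, Matrix.of_apply, List.map_cons, List.map_nil, List.sum_cons, List.sum_nil,
    ite_mul, one_mul, zero_mul]
  norm_num

theorem pvToV_rowIter : ∀ k : Nat, pvToV (pvRowIter k) = (pvTz ^ k).mulVec (pvToV pvRow1) := by
  intro k
  induction k with
  | zero => simp [pvRowIter]
  | succ k ih =>
    show pvToV (pvRowA (pvRowIter k)) = _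
    rw [pvToV_rowA, ih, Matrix.mulVec_mulVec, ← pow_succ']

theorem pvSumCast (r : List Int) (h : r.length = 10) :
    ((r.sum : Int) : ZMod 998244353) = ∑ j : Fin 10, pvToV r j := by
  have hr : r = List.ofFn (fun t : Fin 10 => r.getD (t:Nat) 0) := by
    refine List.ext_getElem (by simp [h]) ?_
    intro t h1 h2
    simp only [List.getElem_ofFn]
    rw [List.getD_eq_getElem?_getD, List.getElem?_eq_getElem (by omega), Option.getD_some]
  conv_lhs => rw [hr]
  rw [List.sum_ofFn]
  push_cast
  refine Finset.sum_congr rfl ?_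
  intro j _
  simp [pvToV, PySem.List.pyGetD_natCast]

theorem pvWCast (P : List (List Int)) :
    ((((PySem.List.pyRange 0 10 1).map (fun i =>
      PySem.Int.mod ((PySem.List.pyRange 0 10 1).foldl (fun s j =>
        s + PySem.List.pyGetD (PySem.List.pyGetD P i []) j 0 *
            PySem.List.pyGetD ([0] ++ List.replicate 9 1) j 0) 0) 998244353)).sum : Int)
      : ZMod 998244353)
    = ∑ i : Fin 10, ((pvToM P).mulVec (pvToV pvRow1)) i := by
  rw [show ([0] ++ List.replicate 9 1 : List Int) = [0,1,1,1,1,1,1,1,1,1] from rfl]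
  rw [show PySem.List.pyRange 0 10 1 = [0,1,2,3,4,5,6,7,8,9] from by decide]
  simp only [List.map_cons, List.map_nil, List.sum_cons, List.sum_nil,
    List.foldl_cons, List.foldl_nil, add_zero]
  push_cast [pvCastMod]
  simp only [Matrix.mulVec, dotProduct, Fin.sum_univ_succ, Fin.sum_univ_zero,
    pvToM, pvToV, Matrix.of_apply]
  norm_num [pvRow1, show PySem.List.pyGetD ([0,1,1,1,1,1,1,1,1,1]:List Int) 0 0 = 0 from by decide, show PySem.List.pyGetD ([0,1,1,1,1,1,1,1,1,1]:List Int) 1 0 = 1 from by decide, show PySem.List.pyGetD ([0,1,1,1,1,1,1,1,1,1]:List Int) 2 0 = 1 from by decide, show PySem.List.pyGetD ([0,1,1,1,1,1,1,1,1,1]:List Int) 3 0 = 1 from by decide, show PySem.List.pyGetD ([0,1,1,1,1,1,1,1,1,1]:List Int) 4 0 = 1 from by decide, show PySem.List.pyGetD ([0,1,1,1,1,1,1,1,1,1]:List Int) 5 0 = 1 from by decide, show PySem.List.pyGetD ([0,1,1,1,1,1,1,1,1,1]:List Int) 6 0 = 1 from by decide, show PySem.List.pyGetD ([0,1,1,1,1,1,1,1,1,1]:List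 Int) 7 0 = 1 from by decide, show PySem.List.pyGetD ([0,1,1,1,1,1,1,1,1,1]:List Int) 8 0 = 1 from by decide, show PySem.List.pyGetD ([0,1,1,1,1,1,1,1,1,1]:List Int) 9 0 = 1 from by decide]
  ring

theorem pvMain (n : Int) (hn : 1 ≤ n) : solve n = solve_alt n := by
  rw [pvSolveRow n hn]
  have hrlen := pvRowIter_len (n.toNat - 1)
  rw [show (10:Int) = ((pvRowIter (n.toNat - 1)).length : Int) from by rw [hrlen]; norm_num]
  have hf := PySem.List.foldl_pyRange_zero_pyGetD' (pvRowIter (n.toNat - 1)) (0:Int)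
    (fun a x => PySem.Int.mod (a + x) 998244353) 0
  beta_reduce at hf
  rw [hf]
  rw [pvFoldMod _ (by
    intro hh
    rw [hh] at hrlen
    simp at hrlen) 0, zero_add]
  simp only [solve_alt]
  apply pvModEqOfCast
  rw [pvSumCast _ hrlen, pvWCast, pvPowLoop, pvToM_I, pvToM_T, one_mul]
  rw [show (n-1).toNat = n.toNat - 1 from by omega]
  refine Finset.sum_congr rfl (fun j _ => ?_)
  rw [pvToV_rowIter]

-- ===== VERDICT (by name: the statement is the Claim_ definition above) =====
theorem solve_spec : Claim_equal_solve := by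
  intro n _ hpre
  unfold Spec_solve
  exact pvMain n hpre
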